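-- pv_equiv track=rewrite | github.com/wooy0ng/crawl | base/base_task.py | setup_queries
-- ===== SOURCE A (Python) =====
-- from itertools import product
--
-- def setup_queries(cfg_query):
--     prefixs = cfg_query['prefixs']
--     postfixs = cfg_query['postfixs']
--     main = cfg_query['main']
--     queries = {
--         idx: "".join(values)
--         for idx, values in enumerate(list(product(prefixs, main, postfixs)))
--     }
--     return queries
-- ===== SOURCE B (Python) =====
-- def setup_queries(cfg_query):
--     prefixs = cfg_query['prefixs']
--     postfixs = cfg_query['postfixs']
--     main = cfg_query['main']
--     # random-access reconstruction: no nested iteration over the product;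
--     # each index is decoded into its (prefix, main, postfix) components by div/mod
--     nm = len(main)
--     nf = len(postfixs)
--     block = nm * nf
--     total = len(prefixs) * block
--     return {idx: prefixs[idx // block] + main[idx // nf % nm] + postfixs[idx % nf]
--             for idx in range(total)}
-- ===== Notes on version B (the rewrite author's own statement) =====
-- stated objective: alternative
-- what changed: Instead of enumerating itertools.product, B computes the total count and rebuilds each entry by random access: the running index idx is decoded into the three list positions with integer div/mod (idx//(nm*nf), idx//nf%nm, idx%nf).
import Mathlib
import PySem

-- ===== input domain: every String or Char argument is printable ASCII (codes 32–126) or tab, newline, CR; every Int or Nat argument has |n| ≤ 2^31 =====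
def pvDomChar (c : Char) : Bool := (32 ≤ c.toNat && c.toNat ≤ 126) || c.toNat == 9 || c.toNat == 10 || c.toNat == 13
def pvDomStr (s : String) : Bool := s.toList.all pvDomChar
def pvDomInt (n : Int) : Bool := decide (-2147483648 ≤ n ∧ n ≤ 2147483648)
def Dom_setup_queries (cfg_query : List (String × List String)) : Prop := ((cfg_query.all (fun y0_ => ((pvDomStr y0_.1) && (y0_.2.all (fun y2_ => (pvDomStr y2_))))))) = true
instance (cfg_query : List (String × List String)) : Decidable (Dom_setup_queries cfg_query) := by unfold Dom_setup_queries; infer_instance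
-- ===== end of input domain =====

-- B replaces enumerating itertools.product by random-access reconstruction: it computes the
-- total count and decodes each index into the three list positions by div/mod ("alternative",
-- same asymptotic cost). Return value only; no argument is mutated.

-- ===== PORT A =====
-- A: product(prefixs, main, postfixs) listed, then a dict comprehension keyed by enumerate index.
-- The keys idx are distinct and increasing, so the dict (insertion-order assoc list) is exactly
-- the enumerated list. "".join of the 3-tuple is PySem.Str.join "" [p, m, f] (exact).
def setup_queries (cfg_query : List (String × List String)) : List (Int × String) :=
  let d := PySem.Dict.mk cfg_query
  let prefixs := (d.get? "prefixs").getD []     -- Pre_ guarantees the key is present (KeyError otherwise)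
  let postfixs := (d.get? "postfixs").getD []
  let main := (d.get? "main").getD []
  let prod := prefixs.flatMap (fun p => main.flatMap (fun m => postfixs.map (fun f => (p, m, f))))
  (PySem.List.enumerate prod 0).map (fun z => (z.1, PySem.Str.join "" [z.2.1, z.2.2.1, z.2.2.2]))

-- ===== PORT B =====
-- B: one map over range(total); each idx is decoded by // and % (PySem.Int.floordiv/mod, exact).
-- The list indexings are ported as pyGetD with default "" — the decoded indices are always in
-- range (proved below), so the default is never taken, matching Python's prefixs[...] exactly.
def setup_queries_alt (cfg_query : List (String × List String)) : List (Int × String) :=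
  let d := PySem.Dict.mk cfg_query
  let prefixs := (d.get? "prefixs").getD []     -- Pre_ guarantees the key is present (KeyError otherwise)
  let postfixs := (d.get? "postfixs").getD []
  let main := (d.get? "main").getD []
  let nm : Int := main.length
  let nf : Int := postfixs.length
  let block : Int := nm * nf
  let total : Int := (prefixs.length : Int) * block
  (PySem.List.pyRange 0 total 1).map (fun idx =>
    (idx,
      PySem.List.pyGetD prefixs (PySem.Int.floordiv idx block) "" ++
      PySem.List.pyGetD main (PySem.Int.mod (PySem.Int.floordiv idx nf) nm) "" ++
      PySem.List.pyGetD postfixs (PySem.Int.mod idx nf) ""))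

-- ===== PRECONDITION & SPEC =====
-- Pre_: the three keys must be present; on a dict missing any of them the Python A raises KeyError.
def Pre_setup_queries (cfg_query : List (String × List String)) : Prop :=
  ((PySem.Dict.mk cfg_query).get? "prefixs").isSome = true ∧
  ((PySem.Dict.mk cfg_query).get? "postfixs").isSome = true ∧
  ((PySem.Dict.mk cfg_query).get? "main").isSome = true
instance (cfg_query : List (String × List String)) : Decidable (Pre_setup_queries cfg_query) := by unfold Pre_setup_queries; infer_instance
def pvWitness_setup_queries : (List (String × List String)) :=
  [("prefixs", ["a", ""]), ("main", ["b"]), ("postfixs", ["c", "d"])]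
def Spec_setup_queries (cfg_query : List (String × List String)) (out : List (Int × String)) : Prop := out = setup_queries_alt cfg_query
instance (cfg_query : List (String × List String)) (out : List (Int × String)) : Decidable (Spec_setup_queries cfg_query out) := by unfold Spec_setup_queries; infer_instance

-- ===== CLAIM (what is proved, stated in full; the proofs are below) =====
def Claim_equal_setup_queries : Prop := ∀ (cfg_query : List (String × List String)), Dom_setup_queries cfg_query → Pre_setup_queries cfg_query → Spec_setup_queries cfg_query (setup_queries cfg_query)

-- ===== LEMMAS AND PROOFS =====

-- length of a flatMap whose blocks all have the same length
theorem pv_length_flatMap_const {α β : Type} (g : α → List β) (B : Nat)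
    (hB : ∀ a, (g a).length = B) : ∀ (P : List α), (P.flatMap g).length = P.length * B
  | [] => by simp
  | p :: P => by
      simp [List.flatMap_cons, pv_length_flatMap_const g B hB P, hB p, Nat.succ_mul]
      omega

-- indexing into a flatMap whose blocks all have length B decodes the index by div/mod
theorem pv_getElem?_flatMap_const {α β : Type} (g : α → List β) (B : Nat)
    (hB : ∀ a, (g a).length = B) :
    ∀ (P : List α) (k : Nat), k < P.length * B →
      (P.flatMap g)[k]? = P[k / B]?.bind (fun a => (g a)[k % B]?)
  | [], k, hk => by simp at hk
  | p :: P, k, hk => by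
      have hB0 : 0 < B := by
        rcases Nat.eq_zero_or_pos B with h | h
        · simp [h] at hk
        · exact h
      by_cases hlt : k < B
      · rw [List.flatMap_cons, List.getElem?_append_left (by rw [hB p]; exact hlt),
          Nat.div_eq_of_lt hlt, Nat.mod_eq_of_lt hlt]
        simp
      · have hk' : k - B < P.length * B := by
          simp [List.length_cons, Nat.succ_mul] at hk; omega
        have hkeq : k = (k - B) + B := by omega
        rw [List.flatMap_cons, List.getElem?_append_right (by rw [hB p]; omega), hB p,
          pv_getElem?_flatMap_const g B hB P (k - B) hk', hkeq,
          Nat.add_div_right _ hB0, Nat.add_mod_right]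
        simp

-- ===== VERDICT (by name: the statement is the Claim_ definition above) =====
theorem setup_queries_spec : Claim_equal_setup_queries := by
  intro cfg _ _
  unfold Spec_setup_queries setup_queries setup_queries_alt
  dsimp only
  set P := ((PySem.Dict.mk cfg).get? "prefixs").getD [] with hP
  set F := ((PySem.Dict.mk cfg).get? "postfixs").getD [] with hF
  set M := ((PySem.Dict.mk cfg).get? "main").getD [] with hM
  have hinlen : ∀ p : String,
      ((M.flatMap (fun m => F.map (fun f => (p, m, f)))).length) = M.length * F.length :=
    fun p => pv_length_flatMap_const _ F.length (fun _ => by simp) M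
  have hlen : (P.flatMap (fun p => M.flatMap (fun m => F.map (fun f => (p, m, f))))).length
      = P.length * (M.length * F.length) :=
    pv_length_flatMap_const _ (M.length * F.length) hinlen P
  -- A's pipeline as a map over the same range as B's
  rw [PySem.List.enumerate_eq_map_pyRange
    (P.flatMap (fun p => M.flatMap (fun m => F.map (fun f => (p, m, f)))))
    (("", "", "") : String × String × String), List.map_map]
  have hbound : ((P.length : Int) * ((M.length : Int) * (F.length : Int)))
      = PySem.List.len (P.flatMap (fun p => M.flatMap (fun m => F.map (fun f => (p, m, f))))) := by
    simp only [PySem.List.len, hlen]; push_cast; ring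
  rw [← hbound]
  apply List.map_congr_left
  intro j hj
  rw [PySem.List.mem_pyRange_one] at hj
  obtain ⟨k, rfl⟩ : ∃ k : Nat, j = (k : Int) := ⟨j.toNat, (Int.toNat_of_nonneg hj.1).symm⟩
  have hk : k < P.length * (M.length * F.length) := by exact_mod_cast hj.2
  have hB0 : 0 < M.length * F.length := by
    rcases Nat.eq_zero_or_pos (M.length * F.length) with h | h
    · rw [h] at hk; omega
    · exact h
  have hF0 : 0 < F.length := by
    rcases Nat.eq_zero_or_pos F.length with h | h
    · rw [h, Nat.mul_zero] at hB0; omega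
    · exact h
  have hM0 : 0 < M.length := by
    rcases Nat.eq_zero_or_pos M.length with h | h
    · rw [h, Nat.zero_mul] at hB0; omega
    · exact h
  have hklen : k < (P.flatMap (fun p => M.flatMap (fun m => F.map (fun f => (p, m, f))))).length := by
    rw [hlen]; exact hk
  have hi1 : k / (M.length * F.length) < P.length := by
    have h := hk; rw [mul_comm] at h; exact Nat.div_lt_of_lt_mul h
  have hi2 : k % (M.length * F.length) < M.length * F.length := Nat.mod_lt _ hB0
  have hj1 : k / F.length % M.length < M.length := Nat.mod_lt _ hM0
  have hj2 : k % F.length < F.length := Nat.mod_lt _ hF0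
  -- index arithmetic: the nested remainder/quotient are B's direct div/mod expressions
  have e1 : k % (M.length * F.length) / F.length = k / F.length % M.length := by
    rw [mul_comm]; exact Nat.mod_mul_right_div_self k F.length M.length
  have e2 : k % (M.length * F.length) % F.length = k % F.length :=
    Nat.mod_mod_of_dvd k ⟨M.length, by ring⟩
  -- decode A's k-th product tuple by div/mod (outer blocks, then inner blocks)
  have hdec := pv_getElem?_flatMap_const _ (M.length * F.length) hinlen P k hk
  have hdec2 := pv_getElem?_flatMap_const (fun m => F.map (fun f =>
      ((P[k / (M.length * F.length)], m, f) : String × String × String))) F.length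
      (fun _ => by simp) M (k % (M.length * F.length)) hi2
  have hval : (P.flatMap (fun p => M.flatMap (fun m => F.map (fun f => (p, m, f)))))[k]?
      = some (P[k / (M.length * F.length)]'hi1, M[k / F.length % M.length]'hj1,
              F[k % F.length]'hj2) := by
    rw [hdec, List.getElem?_eq_getElem hi1, Option.bind_some, hdec2, e1, e2,
      List.getElem?_eq_getElem hj1, Option.bind_some, List.getElem?_map,
      List.getElem?_eq_getElem hj2, Option.map_some]
  have htup : (P.flatMap (fun p => M.flatMap (fun m => F.map (fun f => (p, m, f)))))[k]'hklen
      = (P[k / (M.length * F.length)]'hi1, M[k / F.length % M.length]'hj1,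
         F[k % F.length]'hj2) := by
    have h := hval; rw [List.getElem?_eq_getElem hklen] at h; exact Option.some.inj h
  have hcast : ((M.length : Int) * (F.length : Int)) = ((M.length * F.length : Nat) : Int) := by
    push_cast; ring
  simp only [Function.comp_apply, PySem.List.pyGetD_natCast, hcast,
    PySem.Int.floordiv_natCast, PySem.Int.mod_natCast]
  rw [List.getD_eq_getElem _ _ hklen, htup, List.getD_eq_getElem _ _ hi1,
    List.getD_eq_getElem _ _ hj1, List.getD_eq_getElem _ _ hj2]
  simp [PySem.Str.join, PySem.Chars.join, List.intercalate, String.append_assoc]
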